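-- pv_equiv track=rewrite | github.com/GiRiKoTTe/AtS-2.0 | RIR_aux.py | setup_main_reps_per_set
-- ===== SOURCE A (Python) =====
-- quick_setup_main_target_percent = [0.500,0.525,0.550,0.575,0.600,0.625,0.650,0.675,0.700,0.725,0.750,0.775,0.800,0.825,0.850,0.875,0.900,0.925,0.950,0.975,1.000]
--
-- quick_setup_main_rep_target =   [8,8,8,8,7,7,6,6,5,5,4,4,3,3,2,2,1,1,1,1,1]
--
-- quick_setup_main_intensity =    [0.700,0.750,0.800,0.725,0.775,0.825,0.600,0.750,0.800,0.850,0.775,0.825,0.875,0.600,0.800,0.850,0.900,0.850,0.900,0.950,0.600]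
--
-- def setup_main_reps_per_set (w):
--   if w == 7 or w == 14 or w == 21:
--     return 5
--   else:
--     for n in range (0,22):
--       if quick_setup_main_intensity[w-1] == quick_setup_main_target_percent[n]:
--         return quick_setup_main_rep_target[n]
--         break
--       else:
--        n=+1
-- ===== SOURCE B (Python) =====
-- quick_setup_main_target_percent = [0.500,0.525,0.550,0.575,0.600,0.625,0.650,0.675,0.700,0.725,0.750,0.775,0.800,0.825,0.850,0.875,0.900,0.925,0.950,0.975,1.000]
--
-- quick_setup_main_rep_target =   [8,8,8,8,7,7,6,6,5,5,4,4,3,3,2,2,1,1,1,1,1]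
--
-- quick_setup_main_intensity =    [0.700,0.750,0.800,0.725,0.775,0.825,0.600,0.750,0.800,0.850,0.775,0.825,0.875,0.600,0.800,0.850,0.900,0.850,0.900,0.950,0.600]
--
-- def setup_main_reps_per_set(w):
--   if w == 7 or w == 14 or w == 21:
--     return 5
--   v = quick_setup_main_intensity[w-1]
--   n = round((v - 0.500) / 0.025)
--   return quick_setup_main_rep_target[n]
-- ===== Notes on version B (the rewrite author's own statement) =====
-- stated objective: simpler
-- what changed: The linear scan of the target-percent table is replaced by a closed-form index computation n = round((v-0.500)/0.025) exploiting the arithmetic spacing of the table, so the loop disappears.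
import Mathlib
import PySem

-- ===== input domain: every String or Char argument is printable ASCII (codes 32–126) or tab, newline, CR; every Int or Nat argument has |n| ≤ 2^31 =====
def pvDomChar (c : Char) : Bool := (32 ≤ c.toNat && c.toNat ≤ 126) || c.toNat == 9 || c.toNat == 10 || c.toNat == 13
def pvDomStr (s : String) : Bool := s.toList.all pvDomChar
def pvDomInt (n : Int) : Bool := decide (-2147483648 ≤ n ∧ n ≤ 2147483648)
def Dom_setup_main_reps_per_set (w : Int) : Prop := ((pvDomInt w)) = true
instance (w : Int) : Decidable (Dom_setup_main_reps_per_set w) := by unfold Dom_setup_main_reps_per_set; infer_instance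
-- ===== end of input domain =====

-- B replaces A's linear scan of the target-percent table by a closed-form index computation
-- from the table's arithmetic spacing (objective: simpler).
-- Float note: all table entries are distinct literals with at most three decimals; Python's
-- float equality on them coincides with equality of the values scaled by 1000, so the ports
-- represent the tables as integers ×1000 (exact on the whole domain).

-- ===== PORT A =====
def pvTarget : List Int := [500,525,550,575,600,625,650,675,700,725,750,775,800,825,850,875,900,925,950,975,1000]
def pvRep : List Int := [8,8,8,8,7,7,6,6,5,5,4,4,3,3,2,2,1,1,1,1,1]
def pvIntensity : List Int := [700,750,800,725,775,825,600,750,800,850,775,825,875,600,800,850,900,850,900,950,600]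

-- A's for-loop with early return: recursion over range(0,22), carrying the looked-up intensity.
def pvScanA (v : Option Int) : List Int → Option Int
  | [] => none
  | n :: rest =>
    if v = PySem.List.pyGet? pvTarget n then PySem.List.pyGet? pvRep n
    else pvScanA v rest

def setup_main_reps_per_set (w : Int) : Int :=
  if w = 7 ∨ w = 14 ∨ w = 21 then 5
  else
    -- .getD 0 is only reached where the Python raises or returns None (outside Pre_)
    (pvScanA (PySem.List.pyGet? pvIntensity (w - 1)) (PySem.List.pyRange 0 22 1)).getD 0

-- ===== PORT B =====
def setup_main_reps_per_set_alt (w : Int) : Int :=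
  if w = 7 ∨ w = 14 ∨ w = 21 then 5
  else
    -- v = quick_setup_main_intensity[w-1]; .getD 0 only reached where Python raises (outside Pre_)
    let v := (PySem.List.pyGet? pvIntensity (w - 1)).getD 0
    -- n = round((v - 0.500)/0.025): on the ×1000 tables this is exact integer division by 25
    let n := (v - 500) / 25
    (PySem.List.pyGet? pvRep n).getD 0

-- ===== PRECONDITION & SPEC =====
-- A raises IndexError on quick_setup_main_intensity[w-1] (21 entries, Python negative
-- indexing) unless -20 ≤ w ≤ 21; inside that range it always returns an int.
def Pre_setup_main_reps_per_set (w : Int) : Prop := -20 ≤ w ∧ w ≤ 21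
instance (w : Int) : Decidable (Pre_setup_main_reps_per_set w) := by unfold Pre_setup_main_reps_per_set; infer_instance
def pvWitness_setup_main_reps_per_set : Int := 1

def Spec_setup_main_reps_per_set (w : Int) (out : Int) : Prop := out = setup_main_reps_per_set_alt w
instance (w : Int) (out : Int) : Decidable (Spec_setup_main_reps_per_set w out) := by unfold Spec_setup_main_reps_per_set; infer_instance

-- ===== CLAIM (what is proved, stated in full; the proofs are below) =====
def Claim_equal_setup_main_reps_per_set : Prop := ∀ (w : Int), Dom_setup_main_reps_per_set w → Pre_setup_main_reps_per_set w → Spec_setup_main_reps_per_set w (setup_main_reps_per_set w)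

-- ===== LEMMAS AND PROOFS =====

-- ===== VERDICT (by name: the statement is the Claim_ definition above) =====
theorem setup_main_reps_per_set_spec : Claim_equal_setup_main_reps_per_set := by
  intro w _ hp
  unfold Spec_setup_main_reps_per_set
  obtain ⟨h1, h2⟩ := hp
  interval_cases w <;> decide
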